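-- pv_equiv track=rewrite | github.com/jvuorinen/aoc-2021 | 2021/day_18.py | split_first
-- ===== SOURCE A (Python) =====
-- def split_first(sfn):
--     cp = sfn[:]
--     for i, (n, depth) in enumerate(cp):
--         if n > 9:
--             cp.pop(i)
--             cp.insert(i, ((n // 2) + (n % 2), depth + 1))
--             cp.insert(i, (n // 2, depth + 1))
--             return cp, True
--     return cp, False
-- ===== SOURCE B (Python) =====
-- def split_first(sfn):
--     out = []
--     done = False
--     for n, depth in sfn:
--         if not done and n > 9:
--             out.append((n // 2, depth + 1))
--             out.append((n // 2 + n % 2, depth + 1))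
--             done = True
--         else:
--             out.append((n, depth))
--     return out, done
-- ===== Notes on version B (the rewrite author's own statement) =====
-- stated objective: alternative
-- what changed: Replaces A's copy-then-indexed pop/insert-then-early-return with a single flag-guarded accumulator pass that builds a fresh list.
import Mathlib
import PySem

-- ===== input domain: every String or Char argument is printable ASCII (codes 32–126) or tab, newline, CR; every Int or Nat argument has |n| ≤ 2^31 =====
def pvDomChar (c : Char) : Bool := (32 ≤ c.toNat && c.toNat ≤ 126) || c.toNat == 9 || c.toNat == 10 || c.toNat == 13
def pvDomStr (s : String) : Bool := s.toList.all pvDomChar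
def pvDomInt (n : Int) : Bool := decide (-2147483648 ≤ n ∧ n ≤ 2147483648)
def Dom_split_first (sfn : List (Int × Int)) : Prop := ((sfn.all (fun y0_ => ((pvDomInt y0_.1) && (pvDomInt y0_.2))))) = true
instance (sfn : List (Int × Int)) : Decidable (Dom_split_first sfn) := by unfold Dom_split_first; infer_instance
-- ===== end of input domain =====

-- B is an alternative decomposition of A (single flag-guarded accumulator pass instead of
-- copy + indexed pop/insert + early return); equal return value, same cost.

-- ===== PORT A =====
-- A's enumerate loop over the copy `cp`: `i` is the running index, `rest` the suffix still
-- to be enumerated; on a hit A does cp.pop(i); cp.insert(i, big); cp.insert(i, small).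
def split_first_go (cp : List (Int × Int)) (i : Nat) (rest : List (Int × Int)) :
    (List (Int × Int)) × Bool :=
  match rest with
  | [] => (cp, false)
  | (n, depth) :: rest' =>
    if n > 9 then
      match PySem.List.pop? cp (i : Int) with
      | none => (cp, false)  -- unreachable: i indexes the element just enumerated
      | some (_, cp') =>
        (PySem.List.insert
          (PySem.List.insert cp' (i : Int)
            (PySem.Int.floordiv n 2 + PySem.Int.mod n 2, depth + 1))
          (i : Int) (PySem.Int.floordiv n 2, depth + 1), true)
    else split_first_go cp (i + 1) rest'

def split_first (sfn : List (Int × Int)) : (List (Int × Int)) × Bool :=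
  split_first_go sfn 0 sfn

-- ===== PORT B =====
def split_first_alt (sfn : List (Int × Int)) : (List (Int × Int)) × Bool :=
  sfn.foldl
    (fun acc p =>
      if !acc.2 && p.1 > 9 then
        (acc.1 ++ [(PySem.Int.floordiv p.1 2, p.2 + 1),
                   (PySem.Int.floordiv p.1 2 + PySem.Int.mod p.1 2, p.2 + 1)], true)
      else (acc.1 ++ [p], acc.2))
    ([], false)

-- ===== PRECONDITION & SPEC =====
def Spec_split_first (sfn : List (Int × Int)) (out : (List (Int × Int)) × Bool) : Prop := out = split_first_alt sfn
instance (sfn : List (Int × Int)) (out : (List (Int × Int)) × Bool) : Decidable (Spec_split_first sfn out) := by unfold Spec_split_first; infer_instance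

-- ===== CLAIM (what is proved, stated in full; the proofs are below) =====
def Claim_equal_split_first : Prop := ∀ (sfn : List (Int × Int)), Dom_split_first sfn → Spec_split_first sfn (split_first sfn)

-- ===== LEMMAS AND PROOFS =====

-- once B's done-flag is set, the rest of the fold just appends the remaining pairs
theorem split_first_alt_done (rest : List (Int × Int)) (acc : List (Int × Int)) :
    rest.foldl
      (fun acc p =>
        if !acc.2 && p.1 > 9 then
          (acc.1 ++ [(PySem.Int.floordiv p.1 2, p.2 + 1),
                     (PySem.Int.floordiv p.1 2 + PySem.Int.mod p.1 2, p.2 + 1)], true)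
        else (acc.1 ++ [p], acc.2))
      (acc, true) = (acc ++ rest, true) := by
  induction rest generalizing acc with
  | nil => simp
  | cons p rest ih =>
    rw [List.foldl_cons]
    simp only [Bool.not_true, Bool.false_and, Bool.false_eq_true, if_false]
    rw [ih]; simp

-- A's scan with prefix `pre` already passed equals B's fold continued from (pre, false)
theorem split_first_go_eq (rest pre : List (Int × Int)) :
    split_first_go (pre ++ rest) pre.length rest =
    rest.foldl
      (fun acc p =>
        if !acc.2 && p.1 > 9 then
          (acc.1 ++ [(PySem.Int.floordiv p.1 2, p.2 + 1),
                     (PySem.Int.floordiv p.1 2 + PySem.Int.mod p.1 2, p.2 + 1)], true)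
        else (acc.1 ++ [p], acc.2))
      (pre, false) := by
  induction rest generalizing pre with
  | nil => simp [split_first_go]
  | cons p rest ih =>
    obtain ⟨n, depth⟩ := p
    by_cases hn : n > 9
    · have hlen : pre.length < (pre ++ (n, depth) :: rest).length := by
        simp
      rw [split_first_go]
      simp only [hn, if_pos]
      rw [PySem.List.pop?_natCast _ _ hlen]
      have he : (pre ++ (n, depth) :: rest).eraseIdx pre.length = pre ++ rest := by
        simp [List.eraseIdx_append]
      have hins : ∀ v : Int × Int,
          PySem.List.insert (pre ++ rest) (pre.length : Int) v = pre ++ v :: rest := by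
        intro v
        rw [PySem.List.insert_natCast _ _ _ (by simp)]
        simp
      have hins2 : ∀ v w : Int × Int,
          PySem.List.insert (pre ++ v :: rest) (pre.length : Int) w = pre ++ w :: v :: rest := by
        intro v w
        rw [PySem.List.insert_natCast _ _ _ (by simp)]
        simp
      simp only [he, hins, hins2]
      have : pre ++ (n, depth) :: rest = pre ++ [(n, depth)] ++ rest := by simp
      rw [List.foldl_cons]
      simp only [hn, decide_true, Bool.not_false, Bool.and_true, if_pos]
      rw [split_first_alt_done]
      simp
    · rw [split_first_go]
      simp only [hn, if_neg, not_false_iff]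
      have h1 : pre ++ (n, depth) :: rest = (pre ++ [(n, depth)]) ++ rest := by simp
      have h2 : pre.length + 1 = (pre ++ [(n, depth)]).length := by simp
      rw [h1, h2, ih]
      rw [List.foldl_cons]
      simp [hn]

-- ===== VERDICT (by name: the statement is the Claim_ definition above) =====
theorem split_first_spec : Claim_equal_split_first := by
  intro sfn _
  unfold Spec_split_first split_first split_first_alt
  have := split_first_go_eq sfn []
  simpa using this
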